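-- pv_equiv track=rewrite | github.com/andebetT/PythonProject2025 | Turing.py | min_removals_for_non_decreasing
-- ===== SOURCE A (Python) =====
-- def min_removals_for_non_decreasing(arr):
--     n = len(arr)
--     # Count elements that can stay in a non-decreasing arrangement
--     count = 0
--     # Start from the end and track the current maximum allowed value
--     current_max = float('inf')
--     for num in reversed(arr):
--         if num <= current_max:
--             count += 1
--             current_max = num
--
--     # The minimum removals would be the total elements minus the elements in a valid non-decreasing order
--     return n - count
-- ===== SOURCE B (Python) =====
-- def min_removals_for_non_decreasing(arr):
--     # Forward pass with a monotonic (non-decreasing) stack: an element survives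
--     # the stack iff no strictly smaller element comes after it.
--     stack = []
--     for x in arr:
--         while stack and stack[-1] > x:
--             stack.pop()
--         stack.append(x)
--     return len(arr) - len(stack)
-- ===== Notes on version B (the rewrite author's own statement) =====
-- stated objective: alternative
-- what changed: Replaces A's reverse-direction greedy scan with a scalar running minimum by a forward left-to-right pass over a monotonic stack that pops strictly greater elements; the final stack holds exactly the elements A's greedy keeps.
import Mathlib
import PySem

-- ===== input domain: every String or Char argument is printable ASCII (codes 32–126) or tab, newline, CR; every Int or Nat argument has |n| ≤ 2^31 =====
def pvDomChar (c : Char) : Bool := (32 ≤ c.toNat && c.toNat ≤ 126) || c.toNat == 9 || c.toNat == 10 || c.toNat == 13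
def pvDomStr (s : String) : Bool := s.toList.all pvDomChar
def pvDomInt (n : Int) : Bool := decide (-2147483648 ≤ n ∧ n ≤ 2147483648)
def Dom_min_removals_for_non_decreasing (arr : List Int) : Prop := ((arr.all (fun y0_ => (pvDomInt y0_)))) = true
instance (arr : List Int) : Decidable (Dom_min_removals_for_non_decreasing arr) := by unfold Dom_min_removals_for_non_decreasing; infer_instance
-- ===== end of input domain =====

-- B replaces A's reverse greedy scan (scalar running minimum) with a forward
-- monotonic-stack pass; same linear cost (objective: alternative).

-- ===== PORT A =====
-- state = (count, current_max); `none` models the initial float('inf')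
def min_removals_for_non_decreasing (arr : List Int) : Int :=
  let st := arr.reverse.foldl
    (fun (s : Int × Option Int) num =>
      match s.2 with
      | none => (s.1 + 1, some num)
      | some m => if num ≤ m then (s.1 + 1, some num) else s)
    (0, none)
  (arr.length : Int) - st.1

-- ===== PORT B =====
-- the `while stack and stack[-1] > x: stack.pop()` loop; stack top = list head
def popGT : List Int → Int → List Int
  | [], _ => []
  | t :: rest, x => if x < t then popGT rest x else t :: rest

def min_removals_for_non_decreasing_alt (arr : List Int) : Int :=
  let stack := arr.foldl (fun st x => x :: popGT st x) []
  (arr.length : Int) - stack.length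

-- ===== PRECONDITION & SPEC =====
def Spec_min_removals_for_non_decreasing (arr : List Int) (out : Int) : Prop := out = min_removals_for_non_decreasing_alt arr
instance (arr : List Int) (out : Int) : Decidable (Spec_min_removals_for_non_decreasing arr out) := by unfold Spec_min_removals_for_non_decreasing; infer_instance

-- ===== CLAIM (what is proved, stated in full; the proofs are below) =====
def Claim_equal_min_removals_for_non_decreasing : Prop := ∀ (arr : List Int), Dom_min_removals_for_non_decreasing arr → Spec_min_removals_for_non_decreasing arr (min_removals_for_non_decreasing arr)

-- ===== LEMMAS AND PROOFS =====

-- A's loop step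
def aStep (s : Int × Option Int) (num : Int) : Int × Option Int :=
  match s.2 with
  | none => (s.1 + 1, some num)
  | some m => if num ≤ m then (s.1 + 1, some num) else s

-- minimum of a list, none for []
def mOpt : List Int → Option Int
  | [] => none
  | x :: xs => some (match mOpt xs with | none => x | some m => min x m)

-- the elements A's greedy keeps (left-to-right order): x with no smaller element after it
def keptList : List Int → List Int
  | [] => []
  | x :: xs => if xs.all (fun y => x ≤ y) then x :: keptList xs else keptList xs

lemma mOpt_none_iff (xs : List Int) : mOpt xs = none ↔ xs = [] := by
  cases xs <;> simp [mOpt]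

lemma le_mOpt_iff (xs : List Int) (m x : Int) (h : mOpt xs = some m) :
    x ≤ m ↔ xs.all (fun y => x ≤ y) = true := by
  induction xs generalizing m with
  | nil => simp [mOpt] at h
  | cons a xs ih =>
    cases hb : mOpt xs with
    | none =>
      have hx := (mOpt_none_iff xs).1 hb
      subst hx
      simp only [mOpt] at h
      injection h with h
      subst h
      simp
    | some m' =>
      simp only [mOpt, hb] at h
      injection h with h
      subst h
      simp [List.all_cons, le_min_iff, ih m' hb]

-- A's foldr computes (number of kept elements, minimum)
lemma afold_eq (xs : List Int) :
    xs.foldr (fun num s => aStep s num) ((0 : Int), (none : Option Int))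
      = (((keptList xs).length : Int), mOpt xs) := by
  induction xs with
  | nil => simp [keptList, mOpt]
  | cons x xs ih =>
    rw [List.foldr_cons, ih]
    cases hb : mOpt xs with
    | none =>
      rw [(mOpt_none_iff xs).1 hb] at *
      simp [aStep, keptList, mOpt]
    | some m =>
      by_cases hle : x ≤ m
      · have hall := (le_mOpt_iff xs m x hb).1 hle
        simp [aStep, hb, hle, keptList, hall, mOpt, min_eq_left hle]
      · have hall : xs.all (fun y => x ≤ y) = false :=
          Bool.eq_false_iff.2 (fun hc => hle ((le_mOpt_iff xs m x hb).2 hc))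
        have : min x m = m := min_eq_right (le_of_not_ge hle)
        simp [aStep, hb, hle, keptList, hall, mOpt, this]

lemma mem_keptList (xs : List Int) (z : Int) (h : z ∈ keptList xs) : z ∈ xs := by
  induction xs with
  | nil => simp [keptList] at h
  | cons a xs ih =>
    simp only [keptList] at h
    split at h
    · rcases List.mem_cons.1 h with h | h
      · simp [h]
      · exact List.mem_cons_of_mem _ (ih h)
    · exact List.mem_cons_of_mem _ (ih h)

-- keptList is non-decreasing
lemma keptList_sorted (xs : List Int) : (keptList xs).Pairwise (· ≤ ·) := by
  induction xs with
  | nil => simp [keptList]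
  | cons x xs ih =>
    simp only [keptList]
    split
    · rename_i hall
      refine List.Pairwise.cons ?_ ih
      intro z hz
      simpa using (List.all_eq_true.1 hall) z (mem_keptList xs z hz)
    · exact ih

lemma keptList_append_singleton (xs : List Int) (y : Int) :
    keptList (xs ++ [y]) = (keptList xs).filter (fun z => z ≤ y) ++ [y] := by
  induction xs with
  | nil => simp [keptList]
  | cons x xs ih =>
    simp only [List.cons_append, keptList, List.all_append, List.all_cons, List.all_nil]
    by_cases h1 : xs.all (fun z => x ≤ z) = true <;> by_cases h2 : x ≤ y <;>
      simp [h1, h2, ih, List.filter_cons, keptList]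

lemma popGT_eq_dropWhile (l : List Int) (y : Int) :
    popGT l y = l.dropWhile (fun t => decide (y < t)) := by
  induction l with
  | nil => simp [popGT]
  | cons t rest ih =>
    by_cases h : y < t <;> simp [popGT, h, ih]

-- on a non-increasing list, dropping the > y prefix = filtering ≤ y
lemma dropWhile_eq_filter_of_antitone (l : List Int) (y : Int)
    (h : l.Pairwise (fun a b => b ≤ a)) :
    l.dropWhile (fun t => decide (y < t)) = l.filter (fun t => decide (t ≤ y)) := by
  induction l with
  | nil => simp
  | cons t rest ih =>
    rcases List.pairwise_cons.1 h with ⟨hle, hrest⟩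
    by_cases hy : y < t
    · simp [hy, not_le.2 hy, ih hrest]
    · have hty : t ≤ y := le_of_not_gt hy
      have : rest.filter (fun t => decide (t ≤ y)) = rest := by
        apply List.filter_eq_self.2
        intro z hz
        simpa using le_trans (hle z hz) hty
      simp [hy, hty, this]

-- B's stack after the whole pass = keptList reversed
lemma stack_eq (xs : List Int) :
    xs.foldl (fun st x => x :: popGT st x) [] = (keptList xs).reverse := by
  induction xs using List.reverseRecOn with
  | nil => simp [keptList]
  | append_singleton xs y ih =>
    rw [List.foldl_append, List.foldl_cons, List.foldl_nil, ih,
        popGT_eq_dropWhile, keptList_append_singleton]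
    have hanti : ((keptList xs).reverse).Pairwise (fun a b => b ≤ a) := by
      rw [List.pairwise_reverse]
      exact keptList_sorted xs
    rw [dropWhile_eq_filter_of_antitone _ y hanti]
    simp [List.filter_reverse]

-- ===== VERDICT (by name: the statement is the Claim_ definition above) =====
theorem min_removals_for_non_decreasing_spec : Claim_equal_min_removals_for_non_decreasing := by
  intro arr _
  unfold Spec_min_removals_for_non_decreasing
  unfold min_removals_for_non_decreasing min_removals_for_non_decreasing_alt
  have h1 : arr.reverse.foldl
      (fun (s : Int × Option Int) num =>
        match s.2 with
        | none => (s.1 + 1, some num)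
        | some m => if num ≤ m then (s.1 + 1, some num) else s)
      (0, none)
      = arr.foldr (fun num s => aStep s num) ((0 : Int), (none : Option Int)) := by
    rw [List.foldl_reverse]
    rfl
  simp only [h1, afold_eq, stack_eq, List.length_reverse]
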